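-- pv_equiv track=rewrite | github.com/lilyhuegerich/No-hop | dht_visualization/visual_keys.py | formalize_connections
-- ===== SOURCE A (Python) =====
-- def formalize_connection_names(connections, switches, host_ids):
--     new_connections=[[0,0] for _ in range(len(connections))]
--     for c, connection in enumerate(connections):
--         if connection[0] in switches:
--             new_connections[c][0]="s_"+str(connection[0])
--         elif connection[0] in host_ids:
--             new_connections[c][0]="h_"+str(connection[0])
--         else:
--             new_connections[c][0]="h_client"
--         if connection[1] in switches:
--             new_connections[c][1]="s_"+str(connection[1])
--         elif connection[1] in host_ids:
--             new_connections[c][1]="h_"+str(connection[1])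
--         else:
--             new_connections[c][1]="h_client"
--
--     return new_connections
--
-- def formalize_connections(connections, connection_ports, switches, host_ids):
--     links=list()
--     connections=formalize_connection_names(connections, switches, host_ids)
--     for c, connection in enumerate(connections):
--         if connection[0][0]=="h":
--             links.append([str(connection[0]), str(connection[1])+"-p"+str(connection_ports[c][1])])
--         elif connection[1][0]=="h":
--             links.append([str(connection[0])+"-p"+str(connection_ports[c][0]), str(connection[1])])
--         else:
--             links.append([str(connection[0])+"-p"+str(connection_ports[c][0]), str(connection[1])+"-p"+str(connection_ports[c][1])])
--     return links
-- ===== SOURCE B (Python) =====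
-- def formalize_connections(connections, connection_ports, switches, host_ids):
--     sw = set(switches)
--     hosts = set(host_ids)
--     links = []
--     for connection, ports in zip(connections, connection_ports):
--         left, right = connection[0], connection[1]
--         s0, s1 = left in sw, right in sw
--         l0 = "s_" + str(left) if s0 else ("h_" + str(left) if left in hosts else "h_client")
--         l1 = "s_" + str(right) if s1 else ("h_" + str(right) if right in hosts else "h_client")
--         if s0:
--             l0 += "-p" + str(ports[0])
--         if (not s0) or s1:
--             l1 += "-p" + str(ports[1])
--         links.append([l0, l1])
--     return links
-- ===== Notes on version B (the rewrite author's own statement) =====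
-- stated objective: alternative
-- what changed: Replaces A's two staged passes (build an intermediate list of labelled endpoints, then re-scan it dispatching on the label's first character through a three-way branch) with a single pass over zip(connections, connection_ports) using set membership and a branch-free per-endpoint suffix rule: the left endpoint gets a port suffix iff it is a switch, the right one unless the left is a switch and it is not.
import Mathlib
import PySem

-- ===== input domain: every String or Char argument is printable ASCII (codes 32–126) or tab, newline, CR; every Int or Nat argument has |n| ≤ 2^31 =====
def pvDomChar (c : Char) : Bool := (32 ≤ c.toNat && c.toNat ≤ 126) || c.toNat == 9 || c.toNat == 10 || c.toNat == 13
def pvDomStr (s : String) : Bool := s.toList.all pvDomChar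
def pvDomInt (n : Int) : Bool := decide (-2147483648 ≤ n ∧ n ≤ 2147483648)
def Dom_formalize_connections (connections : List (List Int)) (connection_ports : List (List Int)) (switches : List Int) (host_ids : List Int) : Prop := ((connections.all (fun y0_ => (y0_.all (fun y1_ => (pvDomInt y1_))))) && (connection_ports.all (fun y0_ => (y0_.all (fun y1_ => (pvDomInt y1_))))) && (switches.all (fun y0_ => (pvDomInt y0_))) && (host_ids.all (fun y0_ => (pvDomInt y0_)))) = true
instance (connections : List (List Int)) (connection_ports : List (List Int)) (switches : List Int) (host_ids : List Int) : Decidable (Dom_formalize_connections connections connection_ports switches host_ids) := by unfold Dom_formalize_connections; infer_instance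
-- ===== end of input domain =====

-- B drops A's two staged passes (label all endpoints into an intermediate list, then re-scan it
-- dispatching on the label's first character through a three-way branch) for one pass over
-- zip(connections, connection_ports) with a branch-free per-endpoint rule: the left endpoint
-- gets a port suffix iff it is a switch, the right one iff the left is not a switch or it is
-- one itself — an alternative decomposition of the same function.

-- ===== PORT A =====
def pvNameA (switches host_ids : List Int) (x : Int) : String :=
  if switches.contains x then "s_" ++ PySem.Int.toStr x
  else if host_ids.contains x then "h_" ++ PySem.Int.toStr x
  else "h_client"

-- A's first loop fills a fresh [0,0]-list slot by slot; each slot depends only on its own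
-- connection, so the filled list is this map.
def pvNamesA (connections : List (List Int)) (switches host_ids : List Int) : List (List String) :=
  connections.map (fun connection =>
    [pvNameA switches host_ids ((PySem.List.pyGet? connection 0).getD 0),
     pvNameA switches host_ids ((PySem.List.pyGet? connection 1).getD 0)])

def pvLinksLoopA (connection_ports : List (List Int)) : Nat → List (List String) → List (List String)
  | _, [] => []
  | c, connection :: rest =>
    let c0 := (PySem.List.pyGet? connection 0).getD ""
    let c1 := (PySem.List.pyGet? connection 1).getD ""
    let ports := (PySem.List.pyGet? connection_ports (c : Int)).getD []
    (if (PySem.Str.pyGet? c0 0).getD ' ' = 'h' then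
        [c0, c1 ++ "-p" ++ PySem.Int.toStr ((PySem.List.pyGet? ports 1).getD 0)]
     else if (PySem.Str.pyGet? c1 0).getD ' ' = 'h' then
        [c0 ++ "-p" ++ PySem.Int.toStr ((PySem.List.pyGet? ports 0).getD 0), c1]
     else
        [c0 ++ "-p" ++ PySem.Int.toStr ((PySem.List.pyGet? ports 0).getD 0),
         c1 ++ "-p" ++ PySem.Int.toStr ((PySem.List.pyGet? ports 1).getD 0)])
      :: pvLinksLoopA connection_ports (c + 1) rest

def formalize_connections (connections : List (List Int)) (connection_ports : List (List Int)) (switches : List Int) (host_ids : List Int) : List (List String) :=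
  pvLinksLoopA connection_ports 0 (pvNamesA connections switches host_ids)

-- ===== PORT B =====
def formalize_connections_alt (connections : List (List Int)) (connection_ports : List (List Int)) (switches : List Int) (host_ids : List Int) : List (List String) :=
  let sw := PySem.Set.ofList switches
  let hosts := PySem.Set.ofList host_ids
  (connections.zip connection_ports).map (fun p =>
    let left := (PySem.List.pyGet? p.1 0).getD 0
    let right := (PySem.List.pyGet? p.1 1).getD 0
    let s0 := PySem.Set.contains sw left
    let s1 := PySem.Set.contains sw right
    let l0 := if s0 then "s_" ++ PySem.Int.toStr left
              else if PySem.Set.contains hosts left then "h_" ++ PySem.Int.toStr left else "h_client"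
    let l1 := if s1 then "s_" ++ PySem.Int.toStr right
              else if PySem.Set.contains hosts right then "h_" ++ PySem.Int.toStr right else "h_client"
    let l0' := if s0 then l0 ++ "-p" ++ PySem.Int.toStr ((PySem.List.pyGet? p.2 0).getD 0) else l0
    let l1' := if !s0 || s1 then l1 ++ "-p" ++ PySem.Int.toStr ((PySem.List.pyGet? p.2 1).getD 0) else l1
    [l0', l1'])

-- ===== PRECONDITION & SPEC =====
-- Pre_ excludes exactly the inputs on which A raises IndexError: a connection shorter than 2,
-- a missing connection_ports row, or a ports row too short for the port indices the taken
-- branch reads (index 1 unless connection[0] is a switch; index 0 if it is; both if both are).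
def Pre_formalize_connections (connections : List (List Int)) (connection_ports : List (List Int)) (switches : List Int) (host_ids : List Int) : Prop :=
  connections.length ≤ connection_ports.length ∧
  ∀ p ∈ connections.zip connection_ports,
    2 ≤ p.1.length ∧
    (if switches.contains (p.1.getD 0 0) then
       (if switches.contains (p.1.getD 1 0) then 2 ≤ p.2.length else 1 ≤ p.2.length)
     else 2 ≤ p.2.length)
instance (connections : List (List Int)) (connection_ports : List (List Int)) (switches : List Int) (host_ids : List Int) : Decidable (Pre_formalize_connections connections connection_ports switches host_ids) := by unfold Pre_formalize_connections; infer_instance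

def pvWitness_formalize_connections : List (List Int) × List (List Int) × List Int × List Int :=
  ([[1, 2], [2, 3], [4, 1]], [[10, 11], [12, 13], [14, 15]], [2, 3], [1])

def Spec_formalize_connections (connections : List (List Int)) (connection_ports : List (List Int)) (switches : List Int) (host_ids : List Int) (out : List (List String)) : Prop := out = formalize_connections_alt connections connection_ports switches host_ids
instance (connections : List (List Int)) (connection_ports : List (List Int)) (switches : List Int) (host_ids : List Int) (out : List (List String)) : Decidable (Spec_formalize_connections connections connection_ports switches host_ids out) := by unfold Spec_formalize_connections; infer_instance

-- ===== CLAIM (what is proved, stated in full; the proofs are below) =====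
def Claim_equal_formalize_connections : Prop := ∀ (connections : List (List Int)) (connection_ports : List (List Int)) (switches : List Int) (host_ids : List Int), Dom_formalize_connections connections connection_ports switches host_ids → Pre_formalize_connections connections connection_ports switches host_ids → Spec_formalize_connections connections connection_ports switches host_ids (formalize_connections connections connection_ports switches host_ids)

-- ===== LEMMAS AND PROOFS =====

theorem pv_contains_ofList (l : List Int) (x : Int) :
    (PySem.Set.ofList l).contains x = l.contains x := by
  simp [PySem.Set.contains_eq_listContains]

-- first character of a label produced by A's naming pass
theorem pv_head_nameA (switches host_ids : List Int) (x : Int) :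
    (PySem.Str.pyGet? (pvNameA switches host_ids x) 0).getD ' '
      = if switches.contains x then 's' else 'h' := by
  unfold pvNameA
  split_ifs with h1 h2 <;>
    simp [PySem.Str.pyGet?_eq, PySem.List.pyGet?_zero_cons]

-- A's second loop, rewritten as a map over the zipped inputs (labels still A's)
theorem pv_loop_eq (switches host_ids : List Int) :
    ∀ (conns : List (List Int)) (ports : List (List Int)) (c : Nat),
      conns.length + c ≤ ports.length →
      pvLinksLoopA ports c (pvNamesA conns switches host_ids)
        = (conns.zip (ports.drop c)).map (fun p =>
            let l0 := pvNameA switches host_ids ((PySem.List.pyGet? p.1 0).getD 0)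
            let l1 := pvNameA switches host_ids ((PySem.List.pyGet? p.1 1).getD 0)
            if (PySem.Str.pyGet? l0 0).getD ' ' = 'h' then
              [l0, l1 ++ "-p" ++ PySem.Int.toStr ((PySem.List.pyGet? p.2 1).getD 0)]
            else if (PySem.Str.pyGet? l1 0).getD ' ' = 'h' then
              [l0 ++ "-p" ++ PySem.Int.toStr ((PySem.List.pyGet? p.2 0).getD 0), l1]
            else
              [l0 ++ "-p" ++ PySem.Int.toStr ((PySem.List.pyGet? p.2 0).getD 0),
               l1 ++ "-p" ++ PySem.Int.toStr ((PySem.List.pyGet? p.2 1).getD 0)]) := by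
  intro conns
  induction conns with
  | nil => intro ports c _; simp [pvNamesA, pvLinksLoopA]
  | cons conn rest ih =>
    intro ports c hlen
    have hc : c < ports.length := by simp at hlen; omega
    have hdrop : ports.drop c = ports[c] :: ports.drop (c + 1) :=
      List.drop_eq_getElem_cons hc
    have hget : PySem.List.pyGet? ports (c : Int) = some ports[c] := by
      simp [PySem.List.pyGet?_natCast, List.getElem?_eq_getElem hc]
    simp only [pvNamesA, List.map_cons, pvLinksLoopA, hdrop, List.zip_cons_cons, hget,
      Option.getD_some]
    congr 1
    exact ih ports (c + 1) (by simp at hlen ⊢; omega)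

-- the two per-connection bodies agree: the three-way branch on first characters equals
-- the per-endpoint suffix rule (left suffixed iff switch; right unless left-switch & right-non-switch)
theorem pv_elem_eq (switches host_ids : List Int) (p : List Int × List Int) :
    (let l0 := pvNameA switches host_ids ((PySem.List.pyGet? p.1 0).getD 0)
     let l1 := pvNameA switches host_ids ((PySem.List.pyGet? p.1 1).getD 0)
     if (PySem.Str.pyGet? l0 0).getD ' ' = 'h' then
       [l0, l1 ++ "-p" ++ PySem.Int.toStr ((PySem.List.pyGet? p.2 1).getD 0)]
     else if (PySem.Str.pyGet? l1 0).getD ' ' = 'h' then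
       [l0 ++ "-p" ++ PySem.Int.toStr ((PySem.List.pyGet? p.2 0).getD 0), l1]
     else
       [l0 ++ "-p" ++ PySem.Int.toStr ((PySem.List.pyGet? p.2 0).getD 0),
        l1 ++ "-p" ++ PySem.Int.toStr ((PySem.List.pyGet? p.2 1).getD 0)])
    = (let left := (PySem.List.pyGet? p.1 0).getD 0
       let right := (PySem.List.pyGet? p.1 1).getD 0
       let s0 := PySem.Set.contains (PySem.Set.ofList switches) left
       let s1 := PySem.Set.contains (PySem.Set.ofList switches) right
       let l0 := if s0 then "s_" ++ PySem.Int.toStr left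
                 else if PySem.Set.contains (PySem.Set.ofList host_ids) left then "h_" ++ PySem.Int.toStr left else "h_client"
       let l1 := if s1 then "s_" ++ PySem.Int.toStr right
                 else if PySem.Set.contains (PySem.Set.ofList host_ids) right then "h_" ++ PySem.Int.toStr right else "h_client"
       let l0' := if s0 then l0 ++ "-p" ++ PySem.Int.toStr ((PySem.List.pyGet? p.2 0).getD 0) else l0
       let l1' := if !s0 || s1 then l1 ++ "-p" ++ PySem.Int.toStr ((PySem.List.pyGet? p.2 1).getD 0) else l1
       [l0', l1']) := by
  simp only [pv_head_nameA, pv_contains_ofList]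
  by_cases hs0 : ((PySem.List.pyGet? p.1 0).getD 0) ∈ switches <;>
    by_cases hs1 : ((PySem.List.pyGet? p.1 1).getD 0) ∈ switches <;>
      simp [pvNameA, hs0, hs1]

theorem formalize_connections_spec : Claim_equal_formalize_connections := by
  intro connections connection_ports switches host_ids _ hpre
  unfold Spec_formalize_connections formalize_connections formalize_connections_alt
  rw [pv_loop_eq switches host_ids connections connection_ports 0 (by simpa using hpre.1)]
  simp only [List.drop_zero]
  exact List.map_congr_left (fun p _ => pv_elem_eq switches host_ids p)
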